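-- pv_equiv track=rewrite | github.com/Ra1-dev/Fabrika | lab/stage1/scrapers/reddit/reddit_scraper.py | _classify_feature_DISABLED
-- ===== SOURCE A (Python) =====
-- def _classify_feature_DISABLED(title):
--     t = title.lower()
--     if "artifact" in t:
--         return "Artifacts"
--     elif "sonnet" in t and ("3.5" in t or "3.6" in t):
--         return "Sonnet 3.5"
--     elif "sonnet" in t and ("4" in t or "3.7" in t):
--         return "Sonnet 4"
--     elif "opus" in t:
--         return "Opus"
--     elif any(w in t for w in ["200k", "100k", "long context", "context window"]):
--         return "Long Context"
--     elif any(w in t for w in ["code", "coding", "programming", "developer"]):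
--         return "Coding"
--     elif any(w in t for w in ["writing", "write", "essay", "creative"]):
--         return "Writing"
--     elif "project" in t:
--         return "Projects"
--     elif "api" in t:
--         return "API"
--     elif "computer use" in t:
--         return "Computer Use"
--     elif "claude code" in t:
--         return "Claude Code"
--     elif "mcp" in t:
--         return "MCP"
--     return "General"
-- ===== SOURCE B (Python) =====
-- # Different decomposition: rules are normalized to DNF (lists of AND-clauses of
-- # keywords); ALL rules are evaluated (no early return), the matching rule
-- # indices are collected, and the highest-priority (minimum-index) label wins.
-- RULES = [
--     ("Artifacts", [["artifact"]]),
--     ("Sonnet 3.5", [["sonnet", "3.5"], ["sonnet", "3.6"]]),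
--     ("Sonnet 4", [["sonnet", "4"], ["sonnet", "3.7"]]),
--     ("Opus", [["opus"]]),
--     ("Long Context", [["200k"], ["100k"], ["long context"], ["context window"]]),
--     ("Coding", [["code"], ["coding"], ["programming"], ["developer"]]),
--     ("Writing", [["writing"], ["write"], ["essay"], ["creative"]]),
--     ("Projects", [["project"]]),
--     ("API", [["api"]]),
--     ("Computer Use", [["computer use"]]),
--     ("Claude Code", [["claude code"]]),
--     ("MCP", [["mcp"]]),
-- ]
--
-- def _classify_feature_DISABLED(title):
--     t = title.lower()
--     matched = [i for i, (_, dnf) in enumerate(RULES)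
--                if any(all(w in t for w in clause) for clause in dnf)]
--     return RULES[min(matched)][0] if matched else "General"
-- ===== Notes on version B (the rewrite author's own statement) =====
-- stated objective: alternative
-- what changed: Rules are normalized to DNF clause lists; instead of an if/elif chain with early return, B evaluates every rule, collects all matching rule indices and returns the label of the minimum index (General when none match).
import Mathlib
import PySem

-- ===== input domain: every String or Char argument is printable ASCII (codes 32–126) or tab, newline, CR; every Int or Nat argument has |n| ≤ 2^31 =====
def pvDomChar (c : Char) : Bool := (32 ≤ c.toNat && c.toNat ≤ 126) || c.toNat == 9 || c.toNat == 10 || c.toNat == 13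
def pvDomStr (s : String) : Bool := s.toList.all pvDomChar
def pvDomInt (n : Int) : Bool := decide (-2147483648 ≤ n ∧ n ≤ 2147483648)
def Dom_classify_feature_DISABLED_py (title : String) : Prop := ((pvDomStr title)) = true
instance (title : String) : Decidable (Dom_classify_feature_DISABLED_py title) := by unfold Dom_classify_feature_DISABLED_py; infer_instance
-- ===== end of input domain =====

-- B replaces A's first-match if/elif chain by DNF-normalized rules evaluated ALL at once,
-- collecting matching rule indices and returning the minimum-index label (alternative decomposition).


-- ===== PORT A =====
def classify_feature_DISABLED_py (title : String) : String :=
  let t := PySem.Str.lower title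
  if PySem.Str.isIn "artifact" t then "Artifacts"
  else if PySem.Str.isIn "sonnet" t && (PySem.Str.isIn "3.5" t || PySem.Str.isIn "3.6" t) then "Sonnet 3.5"
  else if PySem.Str.isIn "sonnet" t && (PySem.Str.isIn "4" t || PySem.Str.isIn "3.7" t) then "Sonnet 4"
  else if PySem.Str.isIn "opus" t then "Opus"
  else if ["200k", "100k", "long context", "context window"].any (fun w => PySem.Str.isIn w t) then "Long Context"
  else if ["code", "coding", "programming", "developer"].any (fun w => PySem.Str.isIn w t) then "Coding"
  else if ["writing", "write", "essay", "creative"].any (fun w => PySem.Str.isIn w t) then "Writing"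
  else if PySem.Str.isIn "project" t then "Projects"
  else if PySem.Str.isIn "api" t then "API"
  else if PySem.Str.isIn "computer use" t then "Computer Use"
  else if PySem.Str.isIn "claude code" t then "Claude Code"
  else if PySem.Str.isIn "mcp" t then "MCP"
  else "General"

-- ===== PORT B =====
-- Source B's RULES: (label, DNF as a list of AND-clauses of keywords)
def pvRules : List (String × List (List String)) :=
  [ ("Artifacts", [["artifact"]]),
    ("Sonnet 3.5", [["sonnet", "3.5"], ["sonnet", "3.6"]]),
    ("Sonnet 4", [["sonnet", "4"], ["sonnet", "3.7"]]),
    ("Opus", [["opus"]]),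
    ("Long Context", [["200k"], ["100k"], ["long context"], ["context window"]]),
    ("Coding", [["code"], ["coding"], ["programming"], ["developer"]]),
    ("Writing", [["writing"], ["write"], ["essay"], ["creative"]]),
    ("Projects", [["project"]]),
    ("API", [["api"]]),
    ("Computer Use", [["computer use"]]),
    ("Claude Code", [["claude code"]]),
    ("MCP", [["mcp"]]) ]

-- the DNF evaluation 'any(all(w in t for w in clause) for clause in dnf)'
def pvEval (t : String) (dnf : List (List String)) : Bool :=
  dnf.any (fun clause => clause.all (fun w => PySem.Str.isIn w t))

def classify_feature_DISABLED_py_alt (title : String) : String :=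
  let t := PySem.Str.lower title
  let matched := ((PySem.List.enumerate pvRules).filter (fun p => pvEval t p.2.2)).map (·.1)
  if matched.isEmpty then "General"
  else
    -- RULES[min(matched)][0]; pyGet? cannot miss here, getD is only for totality
    ((PySem.List.min? matched (fun i => i)).bind
        (fun m => (PySem.List.pyGet? pvRules m).map (·.1))).getD "General"

-- ===== PRECONDITION & SPEC =====
def Spec_classify_feature_DISABLED_py (title : String) (out : String) : Prop := out = classify_feature_DISABLED_py_alt title
instance (title : String) (out : String) : Decidable (Spec_classify_feature_DISABLED_py title out) := by unfold Spec_classify_feature_DISABLED_py; infer_instance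

-- ===== CLAIM (what is proved, stated in full; the proofs are below) =====
def Claim_equal_classify_feature_DISABLED_py : Prop := ∀ (title : String), Dom_classify_feature_DISABLED_py title → Spec_classify_feature_DISABLED_py title (classify_feature_DISABLED_py title)

-- ===== LEMMAS AND PROOFS =====

-- folding min over a list of elements all ≥ x leaves x
lemma pvFoldlMin (x : Int) (l : List Int) (h : ∀ y ∈ l, x ≤ y) : l.foldl min x = x := by
  induction l with
  | nil => rfl
  | cons a l ih =>
    have hxa : min x a = x := min_eq_left (h a (by simp))
    simp only [List.foldl_cons, hxa]
    exact ih (fun y hy => h y (by simp [hy]))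

-- on an index-strictly-increasing pair list, the min of the filtered indices is the first match's index
lemma pvMinFilter {α : Type} (P : Int × α → Bool) (l : List (Int × α))
    (h : l.Pairwise (fun p q => p.1 < q.1)) :
    PySem.List.min? ((l.filter P).map (·.1)) (fun i => i) = ((l.find? P).map (·.1)) := by
  induction l with
  | nil => rfl
  | cons a l ih =>
    rcases List.pairwise_cons.mp h with ⟨ha, hl⟩
    cases hP : P a with
    | true =>
      rw [List.filter_cons_of_pos (by simp [hP]), List.find?_cons_of_pos hP]
      simp only [List.map_cons, PySem.List.min?_id_cons, Option.map_some]
      congr 1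
      apply pvFoldlMin
      intro y hy
      rcases List.mem_map.mp hy with ⟨p, hp, rfl⟩
      exact le_of_lt (ha p (List.mem_of_mem_filter hp))
    | false =>
      rw [List.filter_cons_of_neg (by simp [hP]), List.find?_cons_of_neg (by simp [hP])]
      exact ih hl


-- each of A's branch conditions equals the DNF evaluation of the corresponding rule
lemma pvCond0 (t : String) : PySem.Str.isIn "artifact" t = pvEval t [["artifact"]] := by
  simp [pvEval]
lemma pvCond1 (t : String) : (PySem.Str.isIn "sonnet" t && (PySem.Str.isIn "3.5" t || PySem.Str.isIn "3.6" t)) = pvEval t [["sonnet", "3.5"], ["sonnet", "3.6"]] := by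
  simp [pvEval, Bool.and_or_distrib_left]
lemma pvCond2 (t : String) : (PySem.Str.isIn "sonnet" t && (PySem.Str.isIn "4" t || PySem.Str.isIn "3.7" t)) = pvEval t [["sonnet", "4"], ["sonnet", "3.7"]] := by
  simp [pvEval, Bool.and_or_distrib_left]
lemma pvCond3 (t : String) : PySem.Str.isIn "opus" t = pvEval t [["opus"]] := by
  simp [pvEval]
lemma pvCond4 (t : String) : (["200k", "100k", "long context", "context window"].any (fun w => PySem.Str.isIn w t)) = pvEval t [["200k"], ["100k"], ["long context"], ["context window"]] := by
  simp [pvEval]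
lemma pvCond5 (t : String) : (["code", "coding", "programming", "developer"].any (fun w => PySem.Str.isIn w t)) = pvEval t [["code"], ["coding"], ["programming"], ["developer"]] := by
  simp [pvEval]
lemma pvCond6 (t : String) : (["writing", "write", "essay", "creative"].any (fun w => PySem.Str.isIn w t)) = pvEval t [["writing"], ["write"], ["essay"], ["creative"]] := by
  simp [pvEval]
lemma pvCond7 (t : String) : PySem.Str.isIn "project" t = pvEval t [["project"]] := by
  simp [pvEval]
lemma pvCond8 (t : String) : PySem.Str.isIn "api" t = pvEval t [["api"]] := by
  simp [pvEval]
lemma pvCond9 (t : String) : PySem.Str.isIn "computer use" t = pvEval t [["computer use"]] := by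
  simp [pvEval]
lemma pvCond10 (t : String) : PySem.Str.isIn "claude code" t = pvEval t [["claude code"]] := by
  simp [pvEval]
lemma pvCond11 (t : String) : PySem.Str.isIn "mcp" t = pvEval t [["mcp"]] := by
  simp [pvEval]

-- B's collect-and-take-minimum over the enumerated rules equals first-match over the rules
lemma pvAltEqFind (title : String) :
    classify_feature_DISABLED_py_alt title =
      (((PySem.List.enumerate pvRules 0).find? (fun p => pvEval (PySem.Str.lower title) p.2.2)).map
        (fun p => p.2.1)).getD "General" := by
  simp only [classify_feature_DISABLED_py_alt]
  generalize PySem.Str.lower title = t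
  have hpw : (PySem.List.enumerate pvRules 0).Pairwise (fun p q => p.1 < q.1) :=
    PySem.List.pairwise_lt_enumerate _ _
  have hmin := pvMinFilter (fun p => pvEval t p.2.2) (PySem.List.enumerate pvRules 0) hpw
  cases hF : (PySem.List.enumerate pvRules 0).find? (fun p => pvEval t p.2.2) with
  | none =>
    have hfil : (PySem.List.enumerate pvRules 0).filter (fun p => pvEval t p.2.2) = [] := by
      rw [List.filter_eq_nil_iff]
      intro p hp
      simpa using List.find?_eq_none.mp hF p hp
    simp [hfil]
  | some p =>
    have hmem : p ∈ (PySem.List.enumerate pvRules 0).filter (fun p => pvEval t p.2.2) :=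
      List.mem_filter.mpr ⟨List.mem_of_find?_eq_some hF, by simpa using List.find?_some hF⟩
    have hne : ((PySem.List.enumerate pvRules 0).filter (fun p => pvEval t p.2.2)).map (·.1) ≠ [] := by
      intro h
      rw [List.map_eq_nil_iff] at h
      simp [h] at hmem
    rcases (PySem.List.mem_enumerate_iff _ _ _).mp (List.mem_of_find?_eq_some hF) with ⟨k, hk, rfl⟩
    rw [hF] at hmin
    simp only [List.isEmpty_iff, hne, if_neg, hmin]
    simp [PySem.List.pyGet?_natCast, List.getElem?_eq_getElem hk]

-- the enumerated rule table, written out (proved by computation)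
lemma pvEnum : PySem.List.enumerate pvRules = [ (0, ("Artifacts", [["artifact"]])),
    (1, ("Sonnet 3.5", [["sonnet", "3.5"], ["sonnet", "3.6"]])),
    (2, ("Sonnet 4", [["sonnet", "4"], ["sonnet", "3.7"]])),
    (3, ("Opus", [["opus"]])),
    (4, ("Long Context", [["200k"], ["100k"], ["long context"], ["context window"]])),
    (5, ("Coding", [["code"], ["coding"], ["programming"], ["developer"]])),
    (6, ("Writing", [["writing"], ["write"], ["essay"], ["creative"]])),
    (7, ("Projects", [["project"]])),
    (8, ("API", [["api"]])),
    (9, ("Computer Use", [["computer use"]])),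
    (10, ("Claude Code", [["claude code"]])),
    (11, ("MCP", [["mcp"]])) ] := by rfl

-- ===== VERDICT (by name: the statement is the Claim_ definition above) =====
theorem classify_feature_DISABLED_py_spec : Claim_equal_classify_feature_DISABLED_py := by
  intro title _
  unfold Spec_classify_feature_DISABLED_py
  simp only [classify_feature_DISABLED_py]
  rw [pvAltEqFind]
  generalize PySem.Str.lower title = t
  rw [pvCond0 t, pvCond1 t, pvCond2 t, pvCond3 t, pvCond4 t, pvCond5 t, pvCond6 t,
    pvCond7 t, pvCond8 t, pvCond9 t, pvCond10 t, pvCond11 t]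
  rw [pvEnum]
  rw [List.find?_cons, List.find?_cons, List.find?_cons, List.find?_cons, List.find?_cons,
    List.find?_cons, List.find?_cons, List.find?_cons, List.find?_cons, List.find?_cons,
    List.find?_cons, List.find?_cons, List.find?_nil]
  cases h0 : pvEval t [["artifact"]] with
  | true => simp [h0]
  | false =>
    cases h1 : pvEval t [["sonnet", "3.5"], ["sonnet", "3.6"]] with
    | true => simp [h0, h1]
    | false =>
      cases h2 : pvEval t [["sonnet", "4"], ["sonnet", "3.7"]] with
      | true => simp [h0, h1, h2]
      | false =>
        cases h3 : pvEval t [["opus"]] with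
        | true => simp [h0, h1, h2, h3]
        | false =>
          cases h4 : pvEval t [["200k"], ["100k"], ["long context"], ["context window"]] with
          | true => simp [h0, h1, h2, h3, h4]
          | false =>
            cases h5 : pvEval t [["code"], ["coding"], ["programming"], ["developer"]] with
            | true => simp [h0, h1, h2, h3, h4, h5]
            | false =>
              cases h6 : pvEval t [["writing"], ["write"], ["essay"], ["creative"]] with
              | true => simp [h0, h1, h2, h3, h4, h5, h6]
              | false =>
                cases h7 : pvEval t [["project"]] with
                | true => simp [h0, h1, h2, h3, h4, h5, h6, h7]
                | false =>
                  cases h8 : pvEval t [["api"]] with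
                  | true => simp [h0, h1, h2, h3, h4, h5, h6, h7, h8]
                  | false =>
                    cases h9 : pvEval t [["computer use"]] with
                    | true => simp [h0, h1, h2, h3, h4, h5, h6, h7, h8, h9]
                    | false =>
                      cases h10 : pvEval t [["claude code"]] with
                      | true => simp [h0, h1, h2, h3, h4, h5, h6, h7, h8, h9, h10]
                      | false =>
                        cases h11 : pvEval t [["mcp"]] with
                        | true => simp [h0, h1, h2, h3, h4, h5, h6, h7, h8, h9, h10, h11]
                        | false =>
                          simp [h0, h1, h2, h3, h4, h5, h6, h7, h8, h9, h10, h11]
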